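-- pv_equiv track=rewrite | github.com/deepnote/deepnote | packages/reactivity/src/scripts/ast-analyzer.py | comment_out_jupyter_bash_commands
-- ===== SOURCE A (Python) =====
-- def comment_out_jupyter_bash_commands(blocks):
--     for block in blocks:
--         if "content" in block:
--             lines = block["content"].split("\n")
--             for i in range(len(lines)):
--                 if lines[i].startswith("%") or lines[i].startswith("!"):
--                     lines[i] = "#" + lines[i]
--             block["content"] = "\n".join(lines)
--     return blocks
-- ===== SOURCE B (Python) =====
-- def comment_out_jupyter_bash_commands(blocks):
--     for block in blocks:
--         if "content" in block:
--             out = []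
--             at_line_start = True
--             for ch in block["content"]:
--                 if at_line_start and ch in "%!":
--                     out.append("#")
--                 out.append(ch)
--                 at_line_start = ch == "\n"
--             block["content"] = "".join(out)
--     return blocks
-- ===== Notes on version B (the rewrite author's own statement) =====
-- stated objective: alternative
-- what changed: B replaces A's split-into-lines / per-line prefix check / rejoin pipeline with a single left-to-right character scan that inserts '#' whenever a '%' or '!' is seen at a line start, tracking the line-start flag; no intermediate list of lines is built. Both mutate the blocks in place; the proved equivalence is about the returned value.
import Mathlib
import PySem

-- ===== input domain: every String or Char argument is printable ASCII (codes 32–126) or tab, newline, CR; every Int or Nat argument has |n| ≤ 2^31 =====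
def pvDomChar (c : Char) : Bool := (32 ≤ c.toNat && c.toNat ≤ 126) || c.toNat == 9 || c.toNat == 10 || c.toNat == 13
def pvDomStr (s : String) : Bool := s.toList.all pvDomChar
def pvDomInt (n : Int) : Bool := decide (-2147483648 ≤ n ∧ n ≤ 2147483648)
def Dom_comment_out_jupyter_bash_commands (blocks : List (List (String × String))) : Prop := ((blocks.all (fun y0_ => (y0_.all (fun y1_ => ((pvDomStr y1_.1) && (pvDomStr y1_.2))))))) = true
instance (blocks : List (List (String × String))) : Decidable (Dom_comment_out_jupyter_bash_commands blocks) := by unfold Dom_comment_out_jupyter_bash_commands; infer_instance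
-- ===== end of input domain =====

-- B replaces A's split/per-line-check/join pipeline with a single character scan tracking a
-- line-start flag (alternative decomposition, same cost). Both Pythons mutate the block dicts in
-- place; the equivalence proved here is about the RETURNED value.

-- ===== PORT A =====
-- for i in range(len(lines)): lines[i] = "#" + lines[i] if it starts with % or ! — an in-place
-- update of each element in order, ported as the structural recursion producing the updated list.
def aFixLines : List (List Char) → List (List Char)
  | [] => []
  | l :: rest =>
    (if PySem.Chars.startswith l ['%'] || PySem.Chars.startswith l ['!'] then '#' :: l else l)
      :: aFixLines rest

def aTransform (s : String) : String :=
  String.ofList (PySem.Chars.join ['\n'] (aFixLines (PySem.Chars.splitOn s.toList ['\n'])))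

def comment_out_jupyter_bash_commands (blocks : List (List (String × String))) : List (List (String × String)) :=
  blocks.map (fun b =>
    let d := PySem.Dict.mk b
    if d.contains "content" then (d.insert "content" (aTransform (d.getD "content" ""))).items
    else d.items)

-- ===== PORT B =====
-- single pass over the characters; `start` is B's at_line_start flag
def bScan : List Char → Bool → List Char
  | [], _ => []
  | c :: rest, start =>
    (if start && (c == '%' || c == '!') then ['#', c] else [c]) ++ bScan rest (c == '\n')

def bTransform (s : String) : String :=
  String.ofList (bScan s.toList true)

def comment_out_jupyter_bash_commands_alt (blocks : List (List (String × String))) : List (List (String × String)) :=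
  blocks.map (fun b =>
    let d := PySem.Dict.mk b
    if d.contains "content" then (d.insert "content" (bTransform (d.getD "content" ""))).items
    else d.items)

-- ===== PRECONDITION & SPEC =====
def Spec_comment_out_jupyter_bash_commands (blocks : List (List (String × String))) (out : List (List (String × String))) : Prop := out = comment_out_jupyter_bash_commands_alt blocks
instance (blocks : List (List (String × String))) (out : List (List (String × String))) : Decidable (Spec_comment_out_jupyter_bash_commands blocks out) := by unfold Spec_comment_out_jupyter_bash_commands; infer_instance

-- ===== CLAIM (what is proved, stated in full; the proofs are below) =====
def Claim_equal_comment_out_jupyter_bash_commands : Prop := ∀ (blocks : List (List (String × String))), Dom_comment_out_jupyter_bash_commands blocks → Spec_comment_out_jupyter_bash_commands blocks (comment_out_jupyter_bash_commands blocks)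

-- ===== LEMMAS AND PROOFS =====

-- simple recursive characterisation of splitting on a single '\n'
def simpleSplit : List Char → List (List Char)
  | [] => [[]]
  | c :: rest => if c = '\n' then [] :: simpleSplit rest
                 else (c :: (simpleSplit rest).headI) :: (simpleSplit rest).tail

lemma simpleSplit_ne_nil (cs : List Char) : simpleSplit cs ≠ [] := by
  cases cs with
  | nil => simp [simpleSplit]
  | cons c rest => unfold simpleSplit; split <;> simp

-- prepend a prefix onto the first piece
def consHead (pre : List Char) : List (List Char) → List (List Char)
  | [] => [pre]
  | h :: t => (pre ++ h) :: t

lemma go_spec (fuel : Nat) : ∀ (l cur : List Char) (hacc : List (List Char)),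
    l.length < fuel →
    PySem.Chars.splitOn.go ['\n'] fuel l cur.reverse hacc =
      hacc.reverse ++ consHead cur (simpleSplit l) := by
  induction fuel with
  | zero => intro l cur hacc h; omega
  | succ fuel ih =>
    intro l cur hacc h
    cases l with
    | nil =>
      simp [PySem.Chars.splitOn.go, simpleSplit, consHead]
    | cons c rest =>
      rw [PySem.Chars.splitOn.go]
      by_cases hc : c = '\n'
      · subst hc
        have hpre : List.isPrefixOf ['\n'] ('\n' :: rest) = true := by
          simp [List.isPrefixOf]
        simp only [hpre, if_pos, List.reverse_reverse]
        have := ih rest [] (cur :: hacc) (Nat.lt_of_succ_lt_succ (by simpa using h))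
        simp only [List.reverse_nil] at this
        rw [show List.drop (['\n'] : List Char).length ('\n' :: rest) = rest from rfl, this]
        cases hs : simpleSplit rest with
        | nil => exact absurd hs (simpleSplit_ne_nil rest)
        | cons a b => simp [simpleSplit, consHead, hs]
      · have hpre : List.isPrefixOf ['\n'] (c :: rest) = false := by
          simp [List.isPrefixOf]; exact fun h' => hc h'.symm
        simp only [hpre, Bool.false_eq_true, if_false]
        have := ih rest (cur ++ [c]) hacc (Nat.lt_of_succ_lt_succ (by simpa using h))
        simp only [List.reverse_append, List.reverse_singleton, List.singleton_append] at this
        rw [this]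
        cases hs : simpleSplit rest with
        | nil => exact absurd hs (simpleSplit_ne_nil rest)
        | cons a b => simp [simpleSplit, consHead, hs, hc]

lemma splitOn_newline (cs : List Char) :
    PySem.Chars.splitOn cs ['\n'] = simpleSplit cs := by
  unfold PySem.Chars.splitOn
  have := go_spec (cs.length + 1) cs [] [] (by omega)
  simp only [List.reverse_nil] at this
  rw [this]
  cases hs : simpleSplit cs with
  | nil => exact absurd hs (simpleSplit_ne_nil cs)
  | cons a b => simp [consHead]

-- first piece left untouched, remaining pieces get A's per-line fix
def padTail : List (List Char) → List (List Char)
  | [] => []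
  | h :: t => h :: aFixLines t

lemma join_main (cs : List Char) :
    PySem.Chars.join ['\n'] (aFixLines (simpleSplit cs)) = bScan cs true ∧
    PySem.Chars.join ['\n'] (padTail (simpleSplit cs)) = bScan cs false := by
  induction cs with
  | nil =>
    constructor <;> simp [simpleSplit, aFixLines, padTail, bScan,
      PySem.Chars.join_singleton, PySem.Chars.startswith, List.isPrefixOf]
  | cons c rest ih =>
    obtain ⟨ih1, ih2⟩ := ih
    cases hs : simpleSplit rest with
    | nil => exact absurd hs (simpleSplit_ne_nil rest)
    | cons a b =>
      rw [hs] at ih1 ih2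
      have hfixcons : ∀ (x : List Char) (t : List (List Char)), aFixLines (x :: t) =
          (if PySem.Chars.startswith x ['%'] || PySem.Chars.startswith x ['!']
           then '#' :: x else x) :: aFixLines t := fun _ _ => rfl
      by_cases hc : c = '\n'
      · subst hc
        have hsplit : simpleSplit ('\n' :: rest) = [] :: a :: b := by
          simp [simpleSplit, hs]
        have hnil : (if PySem.Chars.startswith ([] : List Char) ['%'] ||
            PySem.Chars.startswith ([] : List Char) ['!']
            then '#' :: ([] : List Char) else []) = ([] : List Char) := by decide
        have key : PySem.Chars.join ['\n'] (aFixLines ([] :: a :: b)) = '\n' :: bScan rest true := by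
          rw [hfixcons, hnil, hfixcons, PySem.Chars.join_cons_cons, ← hfixcons, ih1]
          rfl
        constructor
        · rw [hsplit, key]; rfl
        · rw [hsplit]
          show PySem.Chars.join ['\n'] ([] :: aFixLines (a :: b)) = bScan ('\n' :: rest) false
          rw [show ([] : List Char) :: aFixLines (a :: b) = aFixLines ([] :: a :: b) from by
            rw [hfixcons [] (a :: b), hnil], key]
          rfl
      · have hsplit : simpleSplit (c :: rest) = (c :: a) :: b := by
          simp [simpleSplit, hc, hs]
        have hstart : ∀ (p : Char), PySem.Chars.startswith (c :: a) [p] = (c == p) := by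
          intro p
          simp only [PySem.Chars.startswith, List.isPrefixOf, Bool.and_true]
          simp [eq_comm]
        have hjoin : ∀ (x : List Char) (t : List (List Char)),
            PySem.Chars.join ['\n'] ((c :: x) :: t) = c :: PySem.Chars.join ['\n'] (x :: t) := by
          intro x t
          cases t with
          | nil => rw [PySem.Chars.join_singleton, PySem.Chars.join_singleton]
          | cons y ys => rw [PySem.Chars.join_cons_cons, PySem.Chars.join_cons_cons]; rfl
        have hcn : (c == '\n') = false := by simp [hc]
        have htail : PySem.Chars.join ['\n'] (a :: aFixLines b) = bScan rest false := by
          simpa [padTail] using ih2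
        constructor
        · rw [hsplit, hfixcons, hstart, hstart]
          show PySem.Chars.join ['\n'] _ =
            (if true && (c == '%' || c == '!') then ['#', c] else [c]) ++ bScan rest (c == '\n')
          rw [hcn]
          by_cases hcp : (c == '%' || c == '!') = true
          · rw [if_pos hcp, if_pos (by simpa using hcp)]
            have : PySem.Chars.join ['\n'] (('#' :: c :: a) :: aFixLines b) =
                '#' :: c :: PySem.Chars.join ['\n'] (a :: aFixLines b) := by
              cases hb : aFixLines b with
              | nil => rw [PySem.Chars.join_singleton, PySem.Chars.join_singleton]
              | cons y ys =>
                rw [PySem.Chars.join_cons_cons, PySem.Chars.join_cons_cons]; rfl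
            rw [this, htail]; rfl
          · rw [if_neg (by simpa using hcp), if_neg (by simpa using hcp), hjoin, htail]
            rfl
        · rw [hsplit]
          show PySem.Chars.join ['\n'] ((c :: a) :: aFixLines b) =
            (if false && (c == '%' || c == '!') then ['#', c] else [c]) ++ bScan rest (c == '\n')
          rw [hjoin, htail, hcn]
          rfl

lemma transform_eq (s : String) : aTransform s = bTransform s := by
  unfold aTransform bTransform
  rw [splitOn_newline, (join_main s.toList).1]

-- ===== VERDICT (by name: the statement is the Claim_ definition above) =====
theorem comment_out_jupyter_bash_commands_spec : Claim_equal_comment_out_jupyter_bash_commands := by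
  intro blocks _
  unfold Spec_comment_out_jupyter_bash_commands
  unfold comment_out_jupyter_bash_commands comment_out_jupyter_bash_commands_alt
  apply List.map_congr_left
  intro b _
  simp only [transform_eq]
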